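-- pv_equiv track=rewrite | github.com/sphieu01/Python-codeptit | codeptit python/PY01071 PYTHON FILE.py | check
-- ===== SOURCE A (Python) =====
-- def check(s):
--     s= s.lower()
--     if s[-3:] != ".py" : return False
--
--     for c in s:
--         ok = 0
--         if (c >= 'a' and c <= 'z') or c == '.' or c == '_':
--             ok = 1
--         if ok == 0 :
--             return False
--     return True
-- ===== SOURCE B (Python) =====
-- def check(s):
--     w = ""
--     for c in s.lower():
--         if not ('a' <= c <= 'z' or c == '.' or c == '_'):
--             return False
--         w = (w + c)[-3:]
--     return w == ".py"
-- ===== Notes on version B (the rewrite author's own statement) =====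
-- stated objective: alternative
-- what changed: Replaces A's two-stage suffix-slice test followed by a separate character loop with one streaming pass that validates each character and maintains a rolling window of the last three characters, comparing that window to the required extension only at the end.
import Mathlib
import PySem

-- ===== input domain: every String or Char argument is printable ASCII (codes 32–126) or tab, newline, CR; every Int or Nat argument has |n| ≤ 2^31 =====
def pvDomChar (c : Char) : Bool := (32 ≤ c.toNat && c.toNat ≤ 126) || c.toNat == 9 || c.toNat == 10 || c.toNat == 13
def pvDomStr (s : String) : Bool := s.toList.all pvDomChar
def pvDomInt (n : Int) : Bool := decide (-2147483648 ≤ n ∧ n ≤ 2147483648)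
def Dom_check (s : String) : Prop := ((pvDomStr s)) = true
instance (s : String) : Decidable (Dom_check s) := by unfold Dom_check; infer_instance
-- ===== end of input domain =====

-- B replaces A's two-stage suffix-slice test + separate character loop with a single
-- streaming pass keeping a rolling window of the last three characters (objective: alternative).

-- ===== PORT A =====
-- A's for-loop with its early 'return False': structural recursion over the characters,
-- keeping the ok-flag assignments exactly as written.
def checkLoopA : List Char → Bool
  | [] => true
  | c :: cs =>
    let ok : Int := 0
    let ok := if (decide ('a' ≤ c) && decide (c ≤ 'z')) || c == '.' || c == '_' then (1 : Int) else ok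
    if ok == 0 then false else checkLoopA cs

def check (s : String) : Bool :=
  let t := PySem.Str.lower s
  if (PySem.Str.slice t (some (-3)) none) != ".py" then false
  else checkLoopA t.toList

-- ===== PORT B =====
-- B's single for-loop: each character validated, then appended to the rolling window
-- w = (w + c)[-3:]; at the end w is compared with ".py".
def checkLoopB (w : List Char) : List Char → Bool
  | [] => w == ".py".toList
  | c :: cs =>
    if !((decide ('a' ≤ c) && decide (c ≤ 'z')) || c == '.' || c == '_') then false
    else checkLoopB (PySem.List.slice (w ++ [c]) (some (-3)) none) cs

def check_alt (s : String) : Bool := checkLoopB [] (PySem.Str.lower s).toList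

-- ===== PRECONDITION & SPEC =====
def Spec_check (s : String) (out : Bool) : Prop := out = check_alt s
instance (s : String) (out : Bool) : Decidable (Spec_check s out) := by unfold Spec_check; infer_instance

-- ===== CLAIM (what is proved, stated in full; the proofs are below) =====
def Claim_equal_check : Prop := ∀ (s : String), Dom_check s → Spec_check s (check s)

-- ===== LEMMAS AND PROOFS =====

def allowedB (c : Char) : Bool := (decide ('a' ≤ c) && decide (c ≤ 'z')) || c == '.' || c == '_'

-- last-three window as a drop
def last3 (L : List Char) : List Char := L.drop (L.length - 3)

lemma slice_neg3 (L : List Char) : PySem.List.slice L (some (-3)) none = last3 L := by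
  rw [PySem.List.slice_from_neg_ofNat L 3 (by omega)]; rfl

-- re-windowing: taking the last 3 of (last3 x ++ y) is taking the last 3 of (x ++ y)
lemma last3_rev (L : List Char) : last3 L = (L.reverse.take 3).reverse := by
  unfold last3
  have h := List.reverse_take (i := 3) (l := L.reverse)
  simp at h
  exact h.symm

lemma last3_last3_append (x y : List Char) : last3 (last3 x ++ y) = last3 (x ++ y) := by
  rw [last3_rev, last3_rev (x ++ y), ← List.reverse_inj]
  simp only [List.reverse_reverse, List.reverse_append, last3_rev x]
  rw [List.take_append, List.take_append, List.take_take,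
    show min (3 - y.reverse.length) 3 = 3 - y.reverse.length by omega]

lemma last3_len_le (x : List Char) : (last3 x).length ≤ 3 := by
  unfold last3; simp; omega

lemma checkLoopA_eq_all (L : List Char) : checkLoopA L = L.all allowedB := by
  induction L with
  | nil => rfl
  | cons c cs ih =>
    show (if (if allowedB c then (1:Int) else 0) == 0 then false else checkLoopA cs) = _
    by_cases h : allowedB c = true <;> simp [h, ih]

lemma checkLoopB_eq (w L : List Char) (hw : w.length ≤ 3) :
    checkLoopB w L = (L.all allowedB && (last3 (w ++ L) == ".py".toList)) := by
  induction L generalizing w with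
  | nil => simp [checkLoopB, last3, Nat.sub_eq_zero_of_le hw]
  | cons c cs ih =>
    show (if !(allowedB c) then false else checkLoopB (PySem.List.slice (w ++ [c]) (some (-3)) none) cs) = _
    by_cases h : allowedB c = true
    · rw [if_neg (by simp [h]), slice_neg3, ih _ (last3_len_le _)]
      have : last3 (last3 (w ++ [c]) ++ cs) = last3 (w ++ (c :: cs)) := by
        rw [last3_last3_append, List.append_assoc]; rfl
      simp [h, this]
    · rw [if_pos (by simp at h; simp [h])]
      simp [List.all_cons, h]

lemma slice_eq_iff (t : String) :
    (PySem.Str.slice t (some (-3)) none = ".py") ↔ last3 t.toList = ['.', 'p', 'y'] := by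
  rw [String.ext_iff, PySem.Str.toList_slice, PySem.Chars.slice_eq_listSlice, slice_neg3]
  rfl

lemma body_eq (t : String) :
    (if (PySem.Str.slice t (some (-3)) none) != ".py" then false else checkLoopA t.toList)
      = checkLoopB [] t.toList := by
  rw [checkLoopB_eq _ _ (by simp), checkLoopA_eq_all, List.nil_append]
  by_cases h : PySem.Str.slice t (some (-3)) none = ".py"
  · have h3 : last3 t.toList = ['.', 'p', 'y'] := (slice_eq_iff t).mp h
    simp [h, h3]
  · have h3 : ¬ (last3 t.toList = ['.', 'p', 'y']) := fun hc => h ((slice_eq_iff t).mpr hc)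
    simp only [bne_iff_ne, ne_eq, h, not_false_eq_true, if_pos, Bool.false_eq, Bool.and_eq_false_iff, beq_eq_false_iff_ne]
    right
    exact h3

lemma check_eq_check_alt (s : String) : check s = check_alt s :=
  body_eq (PySem.Str.lower s)

-- ===== VERDICT (by name: the statement is the Claim_ definition above) =====
theorem check_spec : Claim_equal_check := by
  intro s _
  unfold Spec_check
  exact check_eq_check_alt s
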